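-- pv_equiv track=rewrite | github.com/Nik-Kaz/domaci_predavanje5 | zadatak28_strana3.py | pecurki_helter
-- ===== SOURCE A (Python) =====
-- def pecurki_helter(k):
--     sufix = ""
--     if k < 10:
--         if k == 1:
--             sufix += "ku"
--         elif k in [2, 3, 4]:
--             sufix += "ke"
--         else:
--             sufix += "aka"
--     elif k < 20:
--         sufix += "ki"
--     else:
--         return pecurki_helter(k % 10)
--     return sufix
-- ===== SOURCE B (Python) =====
-- # Table-driven: suffix chosen by indexing a precomputed 10-entry table with the
-- # last decimal digit; the teens band and negative counts are guarded first.
-- _SUFFIX = ("aka", "ku", "ke", "ke", "ke", "aka", "aka", "aka", "aka", "aka")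
--
-- def pecurki_helter(k):
--     if 10 <= k < 20:
--         return "ki"
--     if k < 0:
--         return "aka"
--     return _SUFFIX[k % 10]
-- ===== Notes on version B (the rewrite author's own statement) =====
-- stated objective: alternative
-- what changed: Replaces A's recursive branch-chain classification with a table lookup: the suffix is read from a precomputed tuple indexed by the last decimal digit, with the teens band and negative counts handled by two simple guards.
import Mathlib
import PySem

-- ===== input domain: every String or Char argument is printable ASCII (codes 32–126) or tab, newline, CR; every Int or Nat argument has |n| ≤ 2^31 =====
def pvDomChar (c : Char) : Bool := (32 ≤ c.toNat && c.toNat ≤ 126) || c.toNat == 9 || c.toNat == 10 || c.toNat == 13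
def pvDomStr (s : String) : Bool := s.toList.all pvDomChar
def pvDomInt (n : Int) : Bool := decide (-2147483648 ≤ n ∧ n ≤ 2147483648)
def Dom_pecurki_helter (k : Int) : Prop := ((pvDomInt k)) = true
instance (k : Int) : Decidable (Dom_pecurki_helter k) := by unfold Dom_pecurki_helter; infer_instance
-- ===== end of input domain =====

-- ===== PORT A =====
-- Header: B replaces A's recursive branch-chain by a table lookup indexed by the last digit (objective: alternative).
def pecurki_helter (k : Int) : String :=
  if k < 10 then
    if k = 1 then "" ++ "ku"
    else if k = 2 ∨ k = 3 ∨ k = 4 then "" ++ "ke"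
    else "" ++ "aka"
  else if k < 20 then "" ++ "ki"
  else pecurki_helter (PySem.Int.mod k 10)
termination_by (if k < 20 then 0 else 1)
decreasing_by
  have h1 : PySem.Int.mod k 10 < 10 := PySem.Int.mod_lt k (by norm_num)
  have h0 : 0 ≤ PySem.Int.mod k 10 := PySem.Int.mod_nonneg k (by norm_num)
  split_ifs <;> omega

-- ===== PORT B =====
def pvSuffixTable : List String :=
  ["aka", "ku", "ke", "ke", "ke", "aka", "aka", "aka", "aka", "aka"]

def pecurki_helter_alt (k : Int) : String :=
  if 10 ≤ k ∧ k < 20 then "ki"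
  else if k < 0 then "aka"
  -- tuple index k % 10 is always in range (0 ≤ k here), so getD's default is never used
  else pvSuffixTable.getD (PySem.Int.mod k 10).toNat "aka"

-- ===== PRECONDITION & SPEC =====
def Spec_pecurki_helter (k : Int) (out : String) : Prop := out = pecurki_helter_alt k
instance (k : Int) (out : String) : Decidable (Spec_pecurki_helter k out) := by unfold Spec_pecurki_helter; infer_instance

-- ===== CLAIM =====
def Claim_equal_pecurki_helter : Prop := ∀ (k : Int), Dom_pecurki_helter k → Spec_pecurki_helter k (pecurki_helter k)

-- ===== LEMMAS AND PROOFS =====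
-- On a single digit 0 ≤ d < 10, A's branch chain returns exactly the table entry.
lemma pecurki_digit (d : Int) (h0 : 0 ≤ d) (h1 : d < 10) :
    pecurki_helter d = pvSuffixTable.getD d.toNat "aka" := by
  interval_cases d <;> (rw [pecurki_helter.eq_def]; norm_num [pvSuffixTable]) <;> rfl

-- ===== VERDICT =====
theorem pecurki_helter_spec : Claim_equal_pecurki_helter := by
  intro k _
  unfold Spec_pecurki_helter
  by_cases h20 : k < 20
  · by_cases h10 : k < 10
    · by_cases hneg : k < 0
      · rw [pecurki_helter.eq_def]
        simp only [pecurki_helter_alt, if_pos h10,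
          if_neg (by omega : ¬ (10 ≤ k ∧ k < 20)), if_pos hneg,
          if_neg (by omega : ¬ k = 1), if_neg (by omega : ¬ (k = 2 ∨ k = 3 ∨ k = 4))]
        rfl
      · have hk : PySem.Int.mod k 10 = k := by
          unfold PySem.Int.mod; rw [Int.fmod_eq_emod]; simp; omega
        rw [pecurki_digit k (by omega) h10]
        simp only [pecurki_helter_alt,
          if_neg (by omega : ¬ (10 ≤ k ∧ k < 20)), if_neg hneg, hk]
    · rw [pecurki_helter.eq_def]
      simp only [pecurki_helter_alt, if_neg h10, if_pos h20,
        if_pos (⟨by omega, h20⟩ : 10 ≤ k ∧ k < 20)]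
      rfl
  · have hm0 : 0 ≤ PySem.Int.mod k 10 := PySem.Int.mod_nonneg k (by norm_num)
    have hm : PySem.Int.mod k 10 < 10 := PySem.Int.mod_lt k (by norm_num)
    rw [pecurki_helter.eq_def]
    simp only [if_neg (by omega : ¬ k < 10), if_neg h20]
    rw [pecurki_digit _ hm0 hm]
    simp only [pecurki_helter_alt,
      if_neg (by omega : ¬ (10 ≤ k ∧ k < 20)), if_neg (by omega : ¬ k < 0)]
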